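-- pv_equiv track=rewrite | github.com/trishalmuthan/tjhsst-ai | unit5-geneticalgorithms/Tetris/tetris1.py | convert_to_2dlist
-- ===== SOURCE A (Python) =====
-- def convert_to_2dlist(initial_board):
--     final_list = []
--     for count, char in enumerate(initial_board):
--         if count % 10 == 0:
--             sub = initial_board[count:count+10]
--             lst = []
--             for j in sub:
--                 lst.append(j)
--             final_list.append(lst)
--     return final_list
-- ===== SOURCE B (Python) =====
-- def convert_to_2dlist(initial_board):
--     final_list = []
--     row = []
--     for ch in initial_board:
--         row.append(ch)
--         if len(row) == 10:
--             final_list.append(row)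
--             row = []
--     if row:
--         final_list.append(row)
--     return final_list
-- ===== Notes on version B (the rewrite author's own statement) =====
-- stated objective: alternative
-- what changed: B makes a single streaming pass with a row accumulator, appending each element to the current row and flushing it when it reaches 10 (plus a final flush for a short tail), instead of A's enumerate scan that re-slices the input at every index with count % 10 == 0 and copies the slice with an inner loop.
import Mathlib
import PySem

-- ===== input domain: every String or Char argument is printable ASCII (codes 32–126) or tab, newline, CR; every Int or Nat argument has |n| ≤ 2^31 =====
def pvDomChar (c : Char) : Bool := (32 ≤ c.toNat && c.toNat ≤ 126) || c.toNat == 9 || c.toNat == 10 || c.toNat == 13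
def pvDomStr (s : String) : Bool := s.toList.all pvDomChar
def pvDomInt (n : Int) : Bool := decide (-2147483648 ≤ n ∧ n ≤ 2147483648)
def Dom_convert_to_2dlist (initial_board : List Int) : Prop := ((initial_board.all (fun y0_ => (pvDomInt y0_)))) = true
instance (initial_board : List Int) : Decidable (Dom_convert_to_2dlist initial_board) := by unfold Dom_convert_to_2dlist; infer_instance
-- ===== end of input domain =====

-- B replaces A's enumerate-and-reslice scan (slice the input afresh at every index with
-- count % 10 == 0, copying each slice with an inner loop) by a single streaming pass with a
-- row accumulator flushed every 10 elements; objective: alternative (no slicing/indexing at all).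

-- ===== PORT A =====
def convert_to_2dlist (initial_board : List Int) : List (List Int) :=
  (PySem.List.enumerate initial_board).foldl
    (fun final_list cc =>
      if PySem.Int.mod cc.1 10 == 0 then
        let sub := PySem.List.slice initial_board (some cc.1) (some (cc.1 + 10))
        let lst := sub.foldl (fun lst j => lst ++ [j]) ([] : List Int)
        final_list ++ [lst]
      else final_list) []

-- ===== PORT B =====
def convert_to_2dlist_alt (initial_board : List Int) : List (List Int) :=
  let r := initial_board.foldl
      (fun (st : List (List Int) × List Int) ch =>
        let row := st.2 ++ [ch]
        if row.length == 10 then (st.1 ++ [row], ([] : List Int)) else (st.1, row))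
      ([], [])
  if r.2.isEmpty then r.1 else r.1 ++ [r.2]

-- ===== PRECONDITION & SPEC =====
def Spec_convert_to_2dlist (initial_board : List Int) (out : List (List Int)) : Prop := out = convert_to_2dlist_alt initial_board
instance (initial_board : List Int) (out : List (List Int)) : Decidable (Spec_convert_to_2dlist initial_board out) := by unfold Spec_convert_to_2dlist; infer_instance

-- ===== CLAIM (what is proved, stated in full; the proofs are below) =====
def Claim_equal_convert_to_2dlist : Prop := ∀ (initial_board : List Int), Dom_convert_to_2dlist initial_board → Spec_convert_to_2dlist initial_board (convert_to_2dlist initial_board)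

-- ===== LEMMAS AND PROOFS =====

-- reference chunking: successive blocks of 10
def pvChunk : List Int → List (List Int)
  | [] => []
  | x :: xs => ((x :: xs).take 10) :: pvChunk ((x :: xs).drop 10)
termination_by l => l.length
decreasing_by simp

theorem pvChunk_ne {ys : List Int} (h : ys ≠ []) :
    pvChunk ys = ys.take 10 :: pvChunk (ys.drop 10) := by
  cases ys with
  | nil => exact absurd rfl h
  | cons x xs => rw [pvChunk]

-- the inner copy loop of A is the identity
theorem pv_foldl_app (l acc : List Int) : l.foldl (fun a j => a ++ [j]) acc = acc ++ l := by
  induction l generalizing acc with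
  | nil => simp
  | cons x xs ih => simp [List.foldl_cons, ih]

-- the multiples of 10 below n, as a filter of range n
theorem pv_range_filter_ten (n : Nat) :
    (List.range n).filter (fun k => k % 10 == 0)
      = (List.range ((n + 9) / 10)).map (fun k => 10 * k) := by
  induction n with
  | zero => simp
  | succ n ih =>
    rw [List.range_succ, List.filter_append]
    by_cases h : n % 10 = 0
    · have h1 : (n + 1 + 9) / 10 = (n + 9) / 10 + 1 := by omega
      have h2 : 10 * ((n + 9) / 10) = n := by omega
      rw [h1, List.range_succ, List.map_append, ih]
      simp [h, h2]
    · have h1 : (n + 1 + 9) / 10 = (n + 9) / 10 := by omega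
      rw [h1, ih]
      simp [h]

-- the filtered unit-step range is the step-10 range
theorem pv_pyRange_filter (n : Nat) :
    (PySem.List.pyRange 0 n 1).filter (fun j => PySem.Int.mod j 10 == 0)
      = PySem.List.pyRange 0 n 10 := by
  rw [PySem.List.pyRange_one, PySem.List.pyRange_of_pos 0 n (by norm_num)]
  have hn : ((n : Int) - 0).toNat = n := by omega
  have hif : (if (0:Int) < n then (((n:Int) - 0 + 10 - 1) / 10).toNat else 0) = (n + 9) / 10 := by
    by_cases h : 0 < n
    · have : ((n:Int) - 0 + 10 - 1) = ((n + 9 : Nat) : Int) := by push_cast; ring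
      rw [if_pos (by exact_mod_cast h), this]
      omega
    · have hn0 : n = 0 := by omega
      simp [hn0]
  rw [hn, hif, List.filter_map]
  have hfil : (List.range n).filter ((fun j => PySem.Int.mod j 10 == 0) ∘ fun k => (0:Int) + ↑k)
      = (List.range n).filter (fun k => k % 10 == 0) := by
    apply List.filter_congr
    intro k _
    simp [Function.comp]
    omega
  rw [hfil, pv_range_filter_ten, List.map_map]
  apply List.map_congr_left
  intro k _
  simp [Function.comp]

-- A as a map of slices over the chunk-start indices (reduction of A's fold)
theorem pvA_map (xs : List Int) :
    convert_to_2dlist xs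
      = (PySem.List.pyRange 0 (PySem.List.len xs) 10).map
          (fun i => PySem.List.slice xs (some i) (some (i + 10))) := by
  unfold convert_to_2dlist
  rw [PySem.List.enumerate_eq_map_pyRange xs 0, List.foldl_map]
  have hfun : (fun (final_list : List (List Int)) (j : Int) =>
      (fun (final_list : List (List Int)) (cc : Int × Int) =>
        if PySem.Int.mod cc.1 10 == 0 then
          let sub := PySem.List.slice xs (some cc.1) (some (cc.1 + 10))
          let lst := sub.foldl (fun lst j => lst ++ [j]) ([] : List Int)
          final_list ++ [lst]
        else final_list) final_list ((fun j => (j, PySem.List.pyGetD xs j 0)) j))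
      = (fun acc j =>
          if (fun j => PySem.Int.mod j 10 == 0) j = true then
            acc ++ [(fun j => PySem.List.slice xs (some j) (some (j + 10))) j]
          else acc) := by
    funext acc j
    simp only [pv_foldl_app, List.nil_append]
  rw [hfun, PySem.List.foldl_append_if]
  rw [show PySem.List.len xs = ((xs.length : Nat) : Int) from by simp [PySem.List.len]]
  rw [pv_pyRange_filter]
  simp

-- the map-of-slices form IS pvChunk
theorem pv_map_chunk (xs : List Int) :
    (List.range ((xs.length + 9) / 10)).map (fun k => (xs.drop (10 * k)).take 10)
      = pvChunk xs := by
  induction xs using pvChunk.induct with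
  | case1 => simp [pvChunk]
  | case2 x xs ih =>
    have hn : (x :: xs).length = xs.length + 1 := by simp
    have hm : ((x :: xs).length + 9) / 10 = (((x :: xs).drop 10).length + 9) / 10 + 1 := by
      simp only [hn, List.length_drop]
      omega
    rw [hm, List.range_succ_eq_map, List.map_cons, List.map_map]
    rw [pvChunk_ne (by simp)]
    simp only [List.drop_succ_cons, List.length_drop] at ih ⊢
    congr 1
    rw [← ih]
    apply List.map_congr_left
    intro k _
    simp only [Function.comp]
    have h1 : 10 * Nat.succ k = (10 * k + 9) + 1 := by omega
    rw [h1, List.drop_succ_cons, List.drop_drop]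
    congr 2
    omega

-- the step-10 pyRange of slices, as the Nat-range map
theorem pvA_chunk (xs : List Int) :
    (PySem.List.pyRange 0 (PySem.List.len xs) 10).map
        (fun i => PySem.List.slice xs (some i) (some (i + 10))) = pvChunk xs := by
  have hten : PySem.List.pyRange 0 (PySem.List.len xs) 10
      = ((PySem.List.pyRange 0 (PySem.List.len xs) 1).filter
          (fun j => PySem.Int.mod j 10 == 0)) := by
    rw [show PySem.List.len xs = ((xs.length : Nat) : Int) from by simp [PySem.List.len],
        pv_pyRange_filter]
  rw [hten, show PySem.List.len xs = ((xs.length : Nat) : Int) from by simp [PySem.List.len],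
      pv_pyRange_filter, PySem.List.pyRange_of_pos 0 xs.length (by norm_num)]
  have hif : (if (0:Int) < (xs.length : Int) then ((((xs.length : Int)) - 0 + 10 - 1) / 10).toNat else 0)
      = (xs.length + 9) / 10 := by
    by_cases h : 0 < xs.length
    · have : ((xs.length:Int) - 0 + 10 - 1) = ((xs.length + 9 : Nat) : Int) := by push_cast; ring
      rw [if_pos (by exact_mod_cast h), this]
      omega
    · have hn0 : xs.length = 0 := by omega
      simp [hn0]
  rw [hif, List.map_map, ← pv_map_chunk]
  apply List.map_congr_left
  intro k _
  simp only [Function.comp]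
  have h0 : (0:Int) + 10 * (k:Int) = (((10 * k : Nat) : Int)) := by push_cast; ring
  rw [h0]
  have hcast : (((10 * k : Nat) : Int)) + 10 = (((10 * k : Nat) : Int)) + ((10 : Nat) : Int) := by norm_num
  rw [hcast, PySem.List.slice_natCast_add]

-- B's streaming loop against the partial-row chunker
def pvAux (row : List Int) : List Int → List (List Int)
  | [] => if row.isEmpty then [] else [row]
  | c :: l =>
      let r := row ++ [c]
      if r.length == 10 then r :: pvAux [] l else pvAux r l

theorem pv_loopB (l : List Int) :
    ∀ (done : List (List Int)) (row : List Int),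
      (let r := l.foldl
          (fun (st : List (List Int) × List Int) ch =>
            let row := st.2 ++ [ch]
            if row.length == 10 then (st.1 ++ [row], ([] : List Int)) else (st.1, row))
          (done, row);
        if r.2.isEmpty then r.1 else r.1 ++ [r.2]) = done ++ pvAux row l := by
  induction l with
  | nil =>
    intro done row
    cases row with
    | nil => simp [pvAux]
    | cons a r => simp [pvAux]
  | cons c l ih =>
    intro done row
    simp only [List.foldl_cons, pvAux]
    by_cases h : (row ++ [c]).length = 10
    · simp only [h, beq_self_eq_true, if_true, ih, List.append_assoc, List.cons_append,
        List.nil_append]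
    · have hb : ((row ++ [c]).length == 10) = false := by simp at h ⊢; omega
      simp only [hb, if_false, Bool.false_eq_true, ih]

theorem pvAux_chunk (l : List Int) :
    ∀ row : List Int, row.length < 10 → pvAux row l = pvChunk (row ++ l) := by
  induction l with
  | nil =>
    intro row hrow
    cases row with
    | nil => simp [pvAux, pvChunk]
    | cons a r =>
      rw [List.append_nil, pvAux, pvChunk]
      have ht : (a :: r).take 10 = a :: r := List.take_of_length_le (by omega)
      have hd : (a :: r).drop 10 = [] := List.drop_eq_nil_of_le (by omega)
      simp [ht, hd, pvChunk]
  | cons c l ih =>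
    intro row hrow
    rw [pvAux]
    by_cases h : (row ++ [c]).length = 10
    · have hb : ((row ++ [c]).length == 10) = true := by simp [h]
      simp only [hb, if_true]
      rw [ih [] (by simp)]
      have hne : row ++ c :: l ≠ [] := by simp
      rw [pvChunk_ne hne]
      have hsplit : row ++ c :: l = (row ++ [c]) ++ l := by simp
      have hlen : (row ++ [c]).length = 10 := h
      rw [hsplit, List.take_left' hlen, List.drop_left' hlen]
      simp
    · have hb : ((row ++ [c]).length == 10) = false := by simp at h ⊢; omega
      have hlt : (row ++ [c]).length < 10 := by
        simp at h ⊢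
        omega
      simp only [hb, if_false, Bool.false_eq_true]
      rw [ih _ hlt]
      simp

theorem pvB_chunk (xs : List Int) : convert_to_2dlist_alt xs = pvChunk xs := by
  unfold convert_to_2dlist_alt
  have := pv_loopB xs [] []
  simp only at this
  rw [this, pvAux_chunk xs [] (by simp)]
  simp

-- ===== VERDICT (by name: the statement is the Claim_ definition above) =====
theorem convert_to_2dlist_spec : Claim_equal_convert_to_2dlist := by
  intro xs _
  show convert_to_2dlist xs = convert_to_2dlist_alt xs
  rw [pvA_map, pvA_chunk, pvB_chunk]
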